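-- pv_equiv track=rewrite | github.com/kkoruy/chanpy | crwlr/textmanipulator.py | unify_words
-- ===== SOURCE A (Python) =====
-- def unify_words(wordlist):
--     rmwords = []
--     wordlist = sorted(wordlist, key=lambda n: len(n))
--     for i in range(len(wordlist) - 1):
--         if i in rmwords:
--             continue
--         word = wordlist[i]
--         lw1, lw3 = len(word) + 1, len(word) + 3
--         for j in range(i + 1, len(wordlist)):
--             if j in rmwords:
--                 continue
--             nxtword = wordlist[j]
--             if len(nxtword) < lw1:
--                 continue
--             if len(nxtword) > lw3:
--                 break
--             if nxtword.startswith('fuck') or (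
--                     (nxtword[-3:] == 'ing' or nxtword[-2:] in ['in', 'ed'] or nxtword[-1] == 's') and (
--                     nxtword.startswith(word[:-1]) or nxtword.startswith(word[:-2]))):
--                 rmwords.append(j)
--     if len(rmwords) > 0:
--         for idx in sorted(rmwords, reverse=True):
--             wordlist.pop(idx)
--     return wordlist
-- ===== SOURCE B (Python) =====
-- def unify_words(wordlist):
--     def drops(base, w):
--         lb = len(base)
--         if not (lb + 1 <= len(w) <= lb + 3):
--             return False
--         if w.startswith('fuck'):
--             return True
--         return (w[-3:] == 'ing' or w[-2:] in ('in', 'ed') or w[-1] == 's') and \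
--                (w.startswith(base[:-1]) or w.startswith(base[:-2]))
--
--     ws = sorted(wordlist, key=len)
--     out = []
--     while ws:
--         w = ws[0]
--         out.append(w)
--         ws = [x for x in ws[1:] if not drops(w, x)]
--     return out
-- ===== Notes on version B (the rewrite author's own statement) =====
-- stated objective: simpler
-- what changed: Replaced the index-based nested scan with rmwords bookkeeping (in/continue/break over ranges, then descending pops) by a survivor-list recursion: repeatedly keep the shortest remaining word and filter its stemmed/suffixed variants out of the tail, so no indices, removed-set or pop pass exist at all.
import Mathlib
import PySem

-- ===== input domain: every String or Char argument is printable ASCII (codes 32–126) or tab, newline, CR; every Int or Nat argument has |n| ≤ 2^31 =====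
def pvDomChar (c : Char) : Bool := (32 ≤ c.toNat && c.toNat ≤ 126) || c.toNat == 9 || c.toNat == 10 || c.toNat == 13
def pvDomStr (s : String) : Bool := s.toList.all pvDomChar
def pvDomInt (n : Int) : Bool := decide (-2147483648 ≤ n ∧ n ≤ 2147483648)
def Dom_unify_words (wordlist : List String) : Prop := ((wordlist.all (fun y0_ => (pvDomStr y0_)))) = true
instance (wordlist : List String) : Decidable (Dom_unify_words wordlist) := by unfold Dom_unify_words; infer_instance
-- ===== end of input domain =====

-- B replaces A's index-based nested scan with rmwords bookkeeping (continue/break over index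
-- ranges, then descending pops) by a survivor-list recursion: keep the shortest remaining word
-- and filter its stemmed/suffixed variants out of the tail; objective: simpler.

-- ===== PORT A =====

-- the removal test of A's inner loop (everything after the two length guards);
-- 'nxtword[-1]' is ported as pyGet? == some 's': at every call site len(nxtword) ≥ 1
-- (the length guard has already passed), so Python's IndexError is unreachable there.
def pvCondA (word nxt : String) : Bool :=
  PySem.Str.startswith nxt "fuck" ||
  (((PySem.Str.slice nxt (some (-3)) none == "ing") ||
    ["in", "ed"].contains (PySem.Str.slice nxt (some (-2)) none) ||
    (PySem.Str.pyGet? nxt (-1) == some 's')) &&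
   (PySem.Str.startswith nxt (PySem.Str.slice word none (some (-1))) ||
    PySem.Str.startswith nxt (PySem.Str.slice word none (some (-2)))))

-- inner 'for j in range(i+1, n)' loop: recursion over the index list, with the break
-- returning the current rmwords; wordlist[j] is always in range, so '.getD ""' never fires.
def pvInnerA (ws : List String) (word : String) (rm : List Int) : List Int → List Int
  | [] => rm
  | j :: js =>
    if j ∈ rm then pvInnerA ws word rm js
    else
      let nxt := (PySem.List.pyGet? ws j).getD ""
      if PySem.Str.len nxt < PySem.Str.len word + 1 then pvInnerA ws word rm js
      else if PySem.Str.len nxt > PySem.Str.len word + 3 then rm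
      else if pvCondA word nxt then pvInnerA ws word (rm ++ [j]) js
      else pvInnerA ws word rm js

-- outer 'for i in range(n-1)' loop
def pvOuterA (ws : List String) (rm : List Int) : List Int → List Int
  | [] => rm
  | i :: is =>
    if i ∈ rm then pvOuterA ws rm is
    else
      let word := (PySem.List.pyGet? ws i).getD ""
      pvOuterA ws (pvInnerA ws word rm (PySem.List.pyRange (i + 1) (ws.length : Int) 1)) is

def unify_words (wordlist : List String) : List String :=
  let ws := PySem.List.sorted wordlist (fun n => PySem.Str.len n) false
  let rm := pvOuterA ws [] (PySem.List.pyRange 0 ((ws.length : Int) - 1) 1)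
  if rm.length > 0 then
    (PySem.List.sorted rm (fun x => x) true).foldl
      (fun acc idx => match PySem.List.pop? acc idx with
                      | some r => r.2
                      | none => acc) ws
  else ws

-- ===== PORT B =====

-- B's removal test 'drops': the length window, then the same suffix/prefix test;
-- w[-1] as in pvCondA: the window guard has already ensured w is nonempty where it is read.
def pvDrops (base w : String) : Bool :=
  let lb := PySem.Str.len base
  if !(lb + 1 ≤ PySem.Str.len w && PySem.Str.len w ≤ lb + 3) then false
  else if PySem.Str.startswith w "fuck" then true
  else
    ((PySem.Str.slice w (some (-3)) none == "ing") ||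
     ["in", "ed"].contains (PySem.Str.slice w (some (-2)) none) ||
     (PySem.Str.pyGet? w (-1) == some 's')) &&
    (PySem.Str.startswith w (PySem.Str.slice base none (some (-1))) ||
     PySem.Str.startswith w (PySem.Str.slice base none (some (-2))))

-- B's while loop: keep the head, filter its variants out of the tail, recurse.
def pvGo : List String → List String
  | [] => []
  | w :: rest => w :: pvGo (rest.filter (fun x => !pvDrops w x))
termination_by ws => ws.length
decreasing_by
  simp only [List.length_cons, List.length_unattach]
  have h1 := List.length_filter_le (fun x : {x // x ∈ rest} => !pvDrops w x.1) rest.attach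
  simp only [List.length_attach] at h1
  exact Nat.lt_succ_of_le h1

def unify_words_alt (wordlist : List String) : List String :=
  pvGo (PySem.List.sorted wordlist (fun n => PySem.Str.len n) false)

-- ===== PRECONDITION & SPEC =====
def Spec_unify_words (wordlist : List String) (out : List String) : Prop := out = unify_words_alt wordlist
instance (wordlist : List String) (out : List String) : Decidable (Spec_unify_words wordlist out) := by unfold Spec_unify_words; infer_instance

-- ===== CLAIM (what is proved, stated in full; the proofs are below) =====
def Claim_equal_unify_words : Prop := ∀ (wordlist : List String), Dom_unify_words wordlist → Spec_unify_words wordlist (unify_words wordlist)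

-- ===== LEMMAS AND PROOFS =====

theorem pvDrops_eq (base w : String) :
    pvDrops base w =
      ((decide (PySem.Str.len base + 1 ≤ PySem.Str.len w) &&
        decide (PySem.Str.len w ≤ PySem.Str.len base + 3)) && pvCondA base w) := by
  unfold pvDrops pvCondA
  simp only [PySem.Str.len_eq]
  by_cases h1 : ((base.length : Int) + 1 ≤ (w.length : Int)) <;>
    by_cases h2 : ((w.length : Int) ≤ (base.length : Int) + 3)
  · cases hf : PySem.Str.startswith w "fuck" <;>
      simp [hf, h1, h2, (by omega : ¬ w.length ≤ base.length),
        (by omega : ¬ ((base.length : Int) + 3 < (w.length : Int)))]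
  · cases hf : PySem.Str.startswith w "fuck" <;>
      simp [hf, h2, (by omega : ((base.length : Int) + 3 < (w.length : Int)))]
  · cases hf : PySem.Str.startswith w "fuck" <;>
      simp [hf, h1, (by omega : w.length ≤ base.length)]
  · cases hf : PySem.Str.startswith w "fuck" <;>
      simp [hf, h1, (by omega : w.length ≤ base.length)]

def pvInnerP (word : String) (rm : List Int) : List (Int × String) → List Int
  | [] => rm
  | (j, x) :: qs =>
    if j ∈ rm then pvInnerP word rm qs
    else if PySem.Str.len x < PySem.Str.len word + 1 then pvInnerP word rm qs
    else if PySem.Str.len x > PySem.Str.len word + 3 then rm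
    else if pvCondA word x then pvInnerP word (rm ++ [j]) qs
    else pvInnerP word rm qs

set_option maxHeartbeats 1000000 in
theorem pvInnerP_mem (word : String) (qs : List (Int × String)) : ∀ (rm : List Int),
    qs.Pairwise (fun p q => p.1 ≠ q.1) →
    qs.Pairwise (fun p q => PySem.Str.len p.2 ≤ PySem.Str.len q.2) → ∀ (x : Int),
    (x ∈ pvInnerP word rm qs ↔ x ∈ rm ∨ ∃ q ∈ qs, q.1 = x ∧ pvDrops word q.2 = true) := by
  induction qs with
  | nil => intro rm _ _ x; simp [pvInnerP]
  | cons q qs ih =>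
    obtain ⟨j, wq⟩ := q
    intro rm hnd hsort x
    rw [List.pairwise_cons] at hnd hsort
    have ihq := ih rm hnd.2 hsort.2
    rw [pvInnerP]
    by_cases hjm : j ∈ rm
    · simp only [if_pos hjm, ihq, List.exists_mem_cons_iff]
      constructor
      · tauto
      · rintro (h | ⟨rfl, _⟩ | h) <;> tauto
    · rw [if_neg hjm]
      by_cases hlo : PySem.Str.len wq < PySem.Str.len word + 1
      · have hlo' := hlo; simp only [PySem.Str.len_eq, String.length_toList] at hlo'
        have hD : pvDrops word wq = false := by
          rw [pvDrops_eq]; simp; intro h; omega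
        simp only [if_pos hlo, ihq, List.exists_mem_cons_iff, hD]
        tauto
      · rw [if_neg hlo]
        by_cases hhi : PySem.Str.len wq > PySem.Str.len word + 3
        · have hhi' := hhi; simp only [PySem.Str.len_eq, String.length_toList] at hhi'
          have hD : ∀ p, p ∈ (j, wq) :: qs → pvDrops word p.2 = false := by
            intro p hp
            rcases List.mem_cons.mp hp with rfl | hp'
            · rw [pvDrops_eq]; simp; intro _ h; omega
            · have hle := hsort.1 p hp'
              simp only [PySem.Str.len_eq, String.length_toList] at hle
              rw [pvDrops_eq]; simp; intro _ h; omega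
          rw [if_pos hhi]
          constructor
          · tauto
          · rintro (h | ⟨q', hq', rfl, hdq⟩)
            · exact h
            · rw [hD q' hq'] at hdq; cases hdq
        · rw [if_neg hhi]
          by_cases hc : pvCondA word wq = true
          · have hlo' := hlo; have hhi' := hhi
            simp only [PySem.Str.len_eq, String.length_toList] at hlo' hhi'
            have hD : pvDrops word wq = true := by
              rw [pvDrops_eq, hc]; simp; omega
            rw [if_pos hc, ih (rm ++ [j]) hnd.2 hsort.2]
            simp only [List.mem_append, List.mem_singleton, List.exists_mem_cons_iff, hD]
            constructor
            · rintro ((h | rfl) | h) <;> tauto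
            · rintro (h | ⟨rfl, _⟩ | h) <;> tauto
          · have hD : pvDrops word wq = false := by
              rw [pvDrops_eq]; simp [hc]
            rw [if_neg hc, ihq]
            simp only [List.exists_mem_cons_iff, hD]
            tauto

theorem mem_pvInnerP_of_mem (word : String) (qs : List (Int × String)) : ∀ (rm : List Int) (x : Int),
    x ∈ rm → x ∈ pvInnerP word rm qs := by
  induction qs with
  | nil => intro rm x hx; simpa [pvInnerP] using hx
  | cons q qs ih =>
    obtain ⟨j, wq⟩ := q
    intro rm x hx
    rw [pvInnerP]
    split_ifs with h1 h2 h3 h4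
    · exact ih rm x hx
    · exact ih rm x hx
    · exact hx
    · exact ih (rm ++ [j]) x (List.mem_append_left _ hx)
    · exact ih rm x hx

theorem pvInnerP_mem_src (word : String) (qs : List (Int × String)) : ∀ (rm : List Int) (x : Int),
    x ∈ pvInnerP word rm qs → x ∈ rm ∨ x ∈ qs.map Prod.fst := by
  induction qs with
  | nil => intro rm x hx; rw [pvInnerP] at hx; exact Or.inl hx
  | cons q qs ih =>
    obtain ⟨j, wq⟩ := q
    intro rm x hx
    rw [pvInnerP] at hx
    split_ifs at hx with h1 h2 h3 h4
    · rcases ih rm x hx with h | h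
      · exact Or.inl h
      · exact Or.inr (by simpa using Or.inr (by simpa using h))
    · rcases ih rm x hx with h | h
      · exact Or.inl h
      · exact Or.inr (by simpa using Or.inr (by simpa using h))
    · exact Or.inl hx
    · rcases ih (rm ++ [j]) x hx with h | h
      · rcases List.mem_append.mp h with h' | h'
        · exact Or.inl h'
        · exact Or.inr (by simp [List.mem_singleton.mp h'])
      · exact Or.inr (by simpa using Or.inr (by simpa using h))
    · rcases ih rm x hx with h | h
      · exact Or.inl h
      · exact Or.inr (by simpa using Or.inr (by simpa using h))

def pvOuterP (rm : List Int) : List (Int × String) → List Int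
  | [] => rm
  | (i, w) :: ps => if i ∈ rm then pvOuterP rm ps else pvOuterP (pvInnerP w rm ps) ps

theorem pvOuterP_mem (ps : List (Int × String)) : ∀ (rm : List Int) (x : Int),
    x ∈ pvOuterP rm ps → x ∈ rm ∨ x ∈ ps.map Prod.fst := by
  induction ps with
  | nil => intro rm x hx; rw [pvOuterP] at hx; exact Or.inl hx
  | cons p ps ih =>
    obtain ⟨i, w⟩ := p
    intro rm x hx
    rw [pvOuterP] at hx
    split_ifs at hx with h1
    · rcases ih rm x hx with h | h
      · exact Or.inl h
      · exact Or.inr (by simpa using Or.inr (by simpa using h))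
    · rcases ih _ x hx with h | h
      · rcases pvInnerP_mem_src w ps rm x h with h' | h'
        · exact Or.inl h'
        · exact Or.inr (by simpa using Or.inr (by simpa using h'))
      · exact Or.inr (by simpa using Or.inr (by simpa using h))

theorem mem_pvOuterP_of_mem (ps : List (Int × String)) : ∀ (rm : List Int) (x : Int),
    x ∈ rm → x ∈ pvOuterP rm ps := by
  induction ps with
  | nil => intro rm x hx; simpa [pvOuterP] using hx
  | cons p ps ih =>
    obtain ⟨i, w⟩ := p
    intro rm x hx
    rw [pvOuterP]
    split_ifs with h1
    · exact ih rm x hx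
    · exact ih _ x (mem_pvInnerP_of_mem w ps rm x hx)

theorem pvInnerP_nodup (word : String) (qs : List (Int × String)) : ∀ (rm : List Int),
    rm.Nodup → (pvInnerP word rm qs).Nodup := by
  induction qs with
  | nil => intro rm h; simpa [pvInnerP] using h
  | cons q qs ih =>
    obtain ⟨j, wq⟩ := q
    intro rm h
    rw [pvInnerP]
    split_ifs with h1 h2 h3 h4
    · exact ih rm h
    · exact ih rm h
    · exact h
    · exact ih (rm ++ [j]) (h.append (List.nodup_singleton j) (by
        intro a ha haj
        rw [List.mem_singleton] at haj
        subst haj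
        exact h1 ha))
    · exact ih rm h

theorem pvOuterP_nodup (ps : List (Int × String)) : ∀ (rm : List Int),
    rm.Nodup → (pvOuterP rm ps).Nodup := by
  induction ps with
  | nil => intro rm h; simpa [pvOuterP] using h
  | cons p ps ih =>
    obtain ⟨i, w⟩ := p
    intro rm h
    rw [pvOuterP]
    split_ifs with h1
    · exact ih rm h
    · exact ih _ (pvInnerP_nodup w ps rm h)

theorem pvEqFst (ps : List (Int × String)) (h : ps.Pairwise (fun p q => p.1 ≠ q.1)) :
    ∀ p ∈ ps, ∀ q ∈ ps, p.1 = q.1 → p = q := by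
  induction ps with
  | nil => intro p hp; cases hp
  | cons a ps ih =>
    rw [List.pairwise_cons] at h
    intro p hp q hq he
    rcases List.mem_cons.mp hp with rfl | hp' <;> rcases List.mem_cons.mp hq with rfl | hq'
    · rfl
    · exact absurd he (h.1 q hq')
    · exact absurd he.symm (h.1 p hp')
    · exact ih h.2 p hp' q hq' he

theorem pvMapSndFilter (l : List (Int × String)) (p : String → Bool) :
    (l.filter (fun x => p x.2)).map Prod.snd = (l.map Prod.snd).filter p := by
  induction l with
  | nil => rfl
  | cons x l ih => by_cases h : p x.2 <;> simp [h, ih]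

theorem pvMain (ps : List (Int × String)) : ∀ (rm : List Int),
    ps.Pairwise (fun p q => p.1 ≠ q.1) →
    ps.Pairwise (fun p q => PySem.Str.len p.2 ≤ PySem.Str.len q.2) →
    (ps.filter (fun p => decide (p.1 ∉ pvOuterP rm ps))).map Prod.snd =
      pvGo ((ps.filter (fun p => decide (p.1 ∉ rm))).map Prod.snd) := by
  induction ps with
  | nil => intro rm _ _; simp [pvOuterP, pvGo]
  | cons p ps ih =>
    obtain ⟨i, w⟩ := p
    intro rm hnd hsort
    have hndc := hnd; have hsortc := hsort
    rw [List.pairwise_cons] at hndc hsortc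
    rw [pvOuterP]
    by_cases him : i ∈ rm
    · rw [if_pos him]
      have hiout : i ∈ pvOuterP rm ps := mem_pvOuterP_of_mem ps rm i him
      simp only [List.filter_cons, decide_eq_true_eq]
      rw [if_neg (by simp [hiout]), if_neg (by simp [him])]
      exact ih rm hndc.2 hsortc.2
    · rw [if_neg him]
      have hi_not : i ∉ pvOuterP (pvInnerP w rm ps) ps := by
        intro hmem
        have hfst : i ∉ ps.map Prod.fst := by
          intro hf
          obtain ⟨q, hq, he⟩ := List.mem_map.mp hf
          exact hndc.1 q hq he.symm
        rcases pvOuterP_mem ps _ i hmem with h | h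
        · rcases pvInnerP_mem_src w ps rm i h with h' | h'
          · exact him h'
          · exact hfst h'
        · exact hfst h
      simp only [List.filter_cons, decide_eq_true_eq]
      rw [if_pos (by simp [hi_not]), if_pos (by simp [him])]
      simp only [List.map_cons]
      rw [pvGo]
      congr 1
      have key : ps.filter (fun p => decide (p.1 ∉ pvInnerP w rm ps)) =
          (ps.filter (fun p => decide (p.1 ∉ rm))).filter (fun p => !pvDrops w p.2) := by
        rw [List.filter_filter]
        apply List.filter_congr
        intro p hp
        have hiff := pvInnerP_mem w ps rm hndc.2 hsortc.2 p.1
        have hex : (∃ q ∈ ps, q.1 = p.1 ∧ pvDrops w q.2 = true) ↔ pvDrops w p.2 = true := by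
          constructor
          · rintro ⟨q, hq, he, hd⟩
            rw [← pvEqFst ps hndc.2 q hq p hp he]
            exact hd
          · intro hd; exact ⟨p, hp, rfl, hd⟩
        by_cases hd : pvDrops w p.2 = true <;> by_cases hin : p.1 ∈ rm <;>
          simp [hd, hin, hiff, hex, Bool.eq_false_iff.mpr, hd]
      calc (ps.filter (fun p => decide (p.1 ∉ pvOuterP (pvInnerP w rm ps) ps))).map Prod.snd
          = pvGo ((ps.filter (fun p => decide (p.1 ∉ pvInnerP w rm ps))).map Prod.snd) :=
            ih (pvInnerP w rm ps) hndc.2 hsortc.2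
        _ = pvGo (((ps.filter (fun p => decide (p.1 ∉ rm))).map Prod.snd).filter
              (fun x => !pvDrops w x)) := by
            rw [key, pvMapSndFilter _ (fun x => !pvDrops w x)]

theorem pvInnerBridge (word : String) (suf : List String) : ∀ (pre : List String) (rm : List Int),
    pvInnerA (pre ++ suf) word rm
        (PySem.List.pyRange (pre.length : Int) (((pre ++ suf).length : Int)) 1) =
      pvInnerP word rm (PySem.List.enumerate suf (pre.length : Int)) := by
  induction suf with
  | nil =>
    intro pre rm
    rw [PySem.List.pyRange_one_eq_nil (by simp)]
    simp [pvInnerA, pvInnerP, PySem.List.enumerate]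
  | cons x suf ih =>
    intro pre rm
    have hlt : (pre.length : Int) < ((pre ++ x :: suf).length : Int) := by
      simp only [List.length_append, List.length_cons]; push_cast; omega
    rw [PySem.List.pyRange_one_cons hlt, PySem.List.enumerate_cons]
    have harr : pre ++ x :: suf = (pre ++ [x]) ++ suf := by simp
    have hrec : ∀ rm' : List Int, pvInnerA (pre ++ x :: suf) word rm'
        (PySem.List.pyRange ((pre.length : Int) + 1) (((pre ++ x :: suf).length : Int)) 1) =
        pvInnerP word rm' (PySem.List.enumerate suf ((pre.length : Int) + 1)) := by
      intro rm'
      have h := ih (pre ++ [x]) rm'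
      rw [show ((pre ++ [x]).length : Int) = (pre.length : Int) + 1 by simp, ← harr] at h
      exact h
    rw [pvInnerA, pvInnerP]
    have hget : (PySem.List.pyGet? (pre ++ x :: suf) (pre.length : Int)).getD "" = x := by
      rw [PySem.List.pyGet?_append_length]; rfl
    simp only [hget]
    split_ifs <;> first | rfl | apply hrec

theorem pvOuterBridge (suf : List String) : ∀ (pre : List String) (rm : List Int),
    pvOuterA (pre ++ suf) rm
        (PySem.List.pyRange (pre.length : Int) (((pre ++ suf).length : Int) - 1) 1) =
      pvOuterP rm (PySem.List.enumerate suf (pre.length : Int)) := by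
  induction suf with
  | nil =>
    intro pre rm
    rw [PySem.List.pyRange_one_eq_nil (by simp)]
    simp [pvOuterA, pvOuterP, PySem.List.enumerate]
  | cons x suf ih =>
    intro pre rm
    have hget : (PySem.List.pyGet? (pre ++ x :: suf) (pre.length : Int)).getD "" = x := by
      rw [PySem.List.pyGet?_append_length]; rfl
    have harr : pre ++ x :: suf = (pre ++ [x]) ++ suf := by simp
    cases suf with
    | nil =>
      rw [PySem.List.pyRange_one_eq_nil (by simp)]
      rw [PySem.List.enumerate_cons, PySem.List.enumerate_nil]
      by_cases him : (pre.length : Int) ∈ rm <;>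
        simp [pvOuterA, pvOuterP, pvInnerP, him]
    | cons y suf' =>
      have hlt : (pre.length : Int) < ((pre ++ x :: y :: suf').length : Int) - 1 := by
        simp only [List.length_append, List.length_cons]; push_cast; omega
      rw [PySem.List.pyRange_one_cons hlt, PySem.List.enumerate_cons, pvOuterA, pvOuterP]
      simp only [hget]
      have hlen1 : ((pre ++ [x]).length : Int) = (pre.length : Int) + 1 := by simp
      by_cases him : (pre.length : Int) ∈ rm
      · rw [if_pos him, if_pos him]
        have h := ih (pre ++ [x]) rm
        rw [hlen1, ← harr] at h
        exact h
      · rw [if_neg him, if_neg him]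
        have hinner := pvInnerBridge x (y :: suf') (pre ++ [x]) rm
        rw [hlen1, ← harr] at hinner
        rw [hinner]
        have h := ih (pre ++ [x]) (pvInnerP x rm (PySem.List.enumerate (y :: suf') ((pre.length : Int) + 1)))
        rw [hlen1, ← harr] at h
        exact h

theorem pvMapSnd {α : Type} (xs : List α) (s : Int) :
    (PySem.List.enumerate xs s).map Prod.snd = xs :=
  PySem.List.map_snd_enumerate xs s

theorem pvEraseFilter (t : List String) : ∀ (k : Nat) (s : Int) (S : List Int),
    k < t.length → (∀ x ∈ S, x < s + (k : Int)) →
    ((PySem.List.enumerate (t.eraseIdx k) s).filter (fun p => decide (p.1 ∉ S))).map Prod.snd =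
      ((PySem.List.enumerate t s).filter
        (fun p => decide (p.1 ∉ (s + (k : Int)) :: S))).map Prod.snd := by
  induction t with
  | nil => intro k s S hk _; exact absurd hk (Nat.not_lt_zero k)
  | cons w t ih =>
    intro k s S hk hS
    cases k with
    | zero =>
      have hallL : ∀ p ∈ PySem.List.enumerate t s, decide (p.1 ∉ S) = true := by
        intro p hp
        obtain ⟨m, hm, rfl⟩ := (PySem.List.mem_enumerate_iff _ _ p).mp hp
        simp only [decide_eq_true_eq]
        intro hmem
        have := hS _ hmem
        omega
      have hallR : ∀ p ∈ PySem.List.enumerate t (s + 1),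
          decide (p.1 ∉ (s + ((0 : Nat) : Int)) :: S) = true := by
        intro p hp
        obtain ⟨m, hm, rfl⟩ := (PySem.List.mem_enumerate_iff _ _ p).mp hp
        simp only [decide_eq_true_eq, List.mem_cons]
        push_cast
        rintro (h | hmem)
        · omega
        · have := hS _ hmem; omega
      rw [List.eraseIdx_zero, List.tail_cons, PySem.List.enumerate_cons]
      rw [List.filter_cons_of_neg (by simp), List.filter_eq_self.mpr hallL,
        List.filter_eq_self.mpr hallR]
      rw [pvMapSnd, pvMapSnd]
    | succ k =>
      rw [List.eraseIdx_cons_succ, PySem.List.enumerate_cons, PySem.List.enumerate_cons]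
      have htest : (decide (s ∉ ((s + ((k + 1 : Nat) : Int)) :: S)) : Bool) = decide (s ∉ S) := by
        by_cases h : s ∈ S <;> simp [h] <;> push_cast <;> omega
      have hrec := ih k (s + 1) S (by simp only [List.length_cons] at hk; omega) (by intro x hx; have := hS x hx; push_cast at *; omega)
      have hrw : s + 1 + (k : Int) = s + ((k + 1 : Nat) : Int) := by push_cast; ring
      rw [hrw] at hrec
      simp only [List.filter_cons, htest]
      by_cases h : s ∈ S
      · rw [if_neg (by simpa using h), if_neg (by simpa using h)]
        exact hrec
      · rw [if_pos (by simpa using h), if_pos (by simpa using h)]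
        simp only [List.map_cons]
        rw [hrec]

theorem pvPopFold (rmS : List Int) : ∀ (ws : List String),
    rmS.Pairwise (fun a b => b < a) →
    (∀ x ∈ rmS, 0 ≤ x ∧ x < (ws.length : Int)) →
    rmS.foldl (fun acc idx => match PySem.List.pop? acc idx with
                              | some r => r.2
                              | none => acc) ws =
      ((PySem.List.enumerate ws 0).filter (fun p => decide (p.1 ∉ rmS))).map Prod.snd := by
  induction rmS with
  | nil =>
    intro ws _ _
    simp only [List.foldl_nil, List.not_mem_nil, not_false_eq_true, decide_true, List.filter_true]
    rw [pvMapSnd]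
  | cons idx rest ih =>
    intro ws hd hb
    obtain ⟨hb0, hblt⟩ := hb idx List.mem_cons_self
    rw [List.pairwise_cons] at hd
    obtain ⟨k, rfl⟩ : ∃ k : Nat, idx = (k : Int) := ⟨idx.toNat, (Int.toNat_of_nonneg hb0).symm⟩
    have hklen : k < ws.length := by exact_mod_cast hblt
    rw [List.foldl_cons]
    have hpop := PySem.List.pop?_natCast ws k hklen
    simp only [hpop]
    have hbrest : ∀ x ∈ rest, 0 ≤ x ∧ x < ((ws.eraseIdx k).length : Int) := by
      intro x hx
      have h1 := hb x (List.mem_cons_of_mem _ hx)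
      have h2 := hd.1 x hx
      rw [List.length_eraseIdx_of_lt hklen]
      push_cast
      omega
    rw [ih (ws.eraseIdx k) hd.2 hbrest]
    have h := pvEraseFilter ws k 0 rest hklen (by intro x hx; have := hd.1 x hx; omega)
    simpa using h

theorem pvFinal (ws : List String)
    (hsort : ws.Pairwise (fun a b => PySem.Str.len a ≤ PySem.Str.len b)) :
    (let rm := pvOuterA ws [] (PySem.List.pyRange 0 ((ws.length : Int) - 1) 1)
     if rm.length > 0 then
       (PySem.List.sorted rm (fun x => x) true).foldl
         (fun acc idx => match PySem.List.pop? acc idx with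
                         | some r => r.2
                         | none => acc) ws
     else ws) = pvGo ws := by
  have hbr := pvOuterBridge ws [] []
  simp only [List.nil_append, List.length_nil, Nat.cast_zero] at hbr
  have hndP : (PySem.List.enumerate ws 0).Pairwise (fun p q => p.1 ≠ q.1) :=
    (PySem.List.pairwise_lt_enumerate ws 0).imp (fun h => ne_of_lt h)
  have hsortP : (PySem.List.enumerate ws 0).Pairwise
      (fun p q => PySem.Str.len p.2 ≤ PySem.Str.len q.2) := by
    have h := hsort
    rw [← pvMapSnd ws 0] at h
    exact (List.pairwise_map (f := Prod.snd) (R := fun a b => PySem.Str.len a ≤ PySem.Str.len b)).mp h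
  have hmain := pvMain (PySem.List.enumerate ws 0) [] hndP hsortP
  simp only [List.not_mem_nil, not_false_eq_true, decide_true, List.filter_true] at hmain
  rw [pvMapSnd] at hmain
  show (if (pvOuterA ws [] (PySem.List.pyRange 0 ((ws.length : Int) - 1) 1)).length > 0 then _ else ws) = pvGo ws
  rw [hbr]
  by_cases hR0 : (pvOuterP [] (PySem.List.enumerate ws 0)).length > 0
  · rw [if_pos hR0]
    have hnd : (pvOuterP [] (PySem.List.enumerate ws 0)).Nodup :=
      pvOuterP_nodup _ _ List.nodup_nil
    have hbound : ∀ x ∈ pvOuterP [] (PySem.List.enumerate ws 0),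
        0 ≤ x ∧ x < (ws.length : Int) := by
      intro x hx
      rcases pvOuterP_mem _ _ _ hx with h | h
      · cases h
      · rw [PySem.List.map_fst_enumerate] at h
        have := (PySem.List.mem_pyRange_one).mp h
        omega
    have hperm := PySem.List.sorted_perm (pvOuterP [] (PySem.List.enumerate ws 0)) (fun x : Int => x) true
    have hSnd : (PySem.List.sorted (pvOuterP [] (PySem.List.enumerate ws 0)) (fun x : Int => x) true).Nodup :=
      (hperm.nodup_iff).mpr hnd
    have hdesc : (PySem.List.sorted (pvOuterP [] (PySem.List.enumerate ws 0)) (fun x : Int => x) true).Pairwise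
        (fun a b => b < a) := by
      have h1 := PySem.List.sorted_pairwise_rev (pvOuterP [] (PySem.List.enumerate ws 0)) (fun x : Int => x)
      exact (h1.and hSnd).imp (fun h => lt_of_le_of_ne h.1 (fun e => h.2 e.symm))
    have hpop := pvPopFold _ ws hdesc (fun x hx => hbound x (hperm.mem_iff.mp hx))
    rw [hpop]
    have hcongr : ∀ p ∈ PySem.List.enumerate ws 0,
        (decide (p.1 ∉ PySem.List.sorted (pvOuterP [] (PySem.List.enumerate ws 0)) (fun x : Int => x) true) : Bool) =
        decide (p.1 ∉ pvOuterP [] (PySem.List.enumerate ws 0)) := by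
      intro p _
      simp [hperm.mem_iff]
    rw [List.filter_congr hcongr, hmain]
  · rw [if_neg hR0]
    have hRnil : pvOuterP [] (PySem.List.enumerate ws 0) = [] :=
      List.eq_nil_of_length_eq_zero (by omega)
    rw [hRnil] at hmain
    simp only [List.not_mem_nil, not_false_eq_true, decide_true, List.filter_true] at hmain
    rw [pvMapSnd] at hmain
    exact hmain

-- ===== VERDICT (by name: the statement is the Claim_ definition above) =====
theorem unify_words_spec : Claim_equal_unify_words := by
  intro wordlist _
  show unify_words wordlist = unify_words_alt wordlist
  exact pvFinal (PySem.List.sorted wordlist (fun n => PySem.Str.len n) false)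
    (PySem.List.sorted_pairwise wordlist (fun n => PySem.Str.len n))
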